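-- pv_equiv track=rewrite | github.com/ayushpatel497/Daily_POTD | Day081_2025/Q081_GFG.py | maxValTab
-- ===== SOURCE A (Python) =====
-- from typing import List
--
-- def maxValTab(x: int, y: int, arr: List[int]) -> int:
--     prev2 = arr[x]
--     prev1 = max(arr[x], arr[x + 1])
--
--     for j in range(x + 2, y + 1):
--         take = arr[j] + prev2
--         no_take = prev1
--         curr = max(take, no_take)
--         prev2, prev1 = prev1, curr
--
--     return prev1
-- ===== SOURCE B (Python) =====
-- from typing import List, Optional, Tuple
--
-- # max-plus arithmetic; None plays -infinity
-- def oadd(a: Optional[int], b: Optional[int]) -> Optional[int]: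
--     if a is None or b is None:
--         return None
--     return a + b
--
-- def omax(a: Optional[int], b: Optional[int]) -> Optional[int]:
--     if a is None:
--         return b
--     if b is None:
--         return a
--     return max(a, b)
--
-- Mat = Tuple[Optional[int], Optional[int], Optional[int], Optional[int]]
--
-- def matJ(arr: List[int], j: int) -> Mat:
--     # one DP step (prev1, prev2) -> (max(prev1, arr[j]+prev2), prev1) as a max-plus 2x2 matrix
--     return (0, arr[j], 0, None)
--
-- def compose(m: Mat, n: Mat) -> Mat:
--     ma, mb, mc, md = m
--     na, nb, nc, nd = n
--     return (omax(oadd(ma, na), oadd(mb, nc)),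
--             omax(oadd(ma, nb), oadd(mb, nd)),
--             omax(oadd(mc, na), oadd(md, nc)),
--             omax(oadd(mc, nb), oadd(md, nd)))
--
-- def applyM(m: Mat, v: Tuple[Optional[int], Optional[int]]) -> Tuple[Optional[int], Optional[int]]:
--     a, b, c, d = m
--     v1, v2 = v
--     return (omax(oadd(a, v1), oadd(b, v2)), omax(oadd(c, v1), oadd(d, v2)))
--
-- def prodR(arr: List[int], lo: int, hi: int) -> Mat:
--     # max-plus product of matJ over j in [lo, hi), hi > lo, by divide and conquer
--     if hi == lo + 1:
--         return matJ(arr, lo)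
--     mid = lo + (hi - lo) // 2
--     return compose(prodR(arr, mid, hi), prodR(arr, lo, mid))
--
-- def maxValTab(x: int, y: int, arr: List[int]) -> int:
--     v = (max(arr[x], arr[x + 1]), arr[x])
--     goal = max(y, x + 1)
--     if goal >= x + 2:
--         v = applyM(prodR(arr, x + 2, goal + 1), v)
--     return v[0]
-- ===== Notes on version B (the rewrite author's own statement) =====
-- stated objective: alternative
-- what changed: B views each DP step as a 2x2 max-plus matrix and computes the matrix product over the index range by divide and conquer, then applies it to the base vector, instead of A's left-to-right two-variable scan.
import Mathlib
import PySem

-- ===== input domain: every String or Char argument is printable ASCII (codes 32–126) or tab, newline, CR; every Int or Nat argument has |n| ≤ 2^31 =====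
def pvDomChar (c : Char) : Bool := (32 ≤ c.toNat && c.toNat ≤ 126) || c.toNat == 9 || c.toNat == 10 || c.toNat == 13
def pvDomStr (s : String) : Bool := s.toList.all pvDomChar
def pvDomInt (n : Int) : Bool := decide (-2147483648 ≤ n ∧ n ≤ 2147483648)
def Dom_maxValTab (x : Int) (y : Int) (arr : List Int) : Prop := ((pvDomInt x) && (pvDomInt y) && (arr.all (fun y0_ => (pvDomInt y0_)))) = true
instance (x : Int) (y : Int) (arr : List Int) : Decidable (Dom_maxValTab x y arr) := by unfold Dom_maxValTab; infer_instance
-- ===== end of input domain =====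

-- B replaces A's left-to-right two-variable scan by a divide-and-conquer product of
-- 2x2 max-plus matrices (one per DP step) applied to the base vector; same cost class, alternative algorithm.

-- ===== PORT A =====
-- literal transliteration of A: prev2 = arr[x]; prev1 = max(arr[x], arr[x+1]);
-- for j in range(x+2, y+1): prev2, prev1 = prev1, max(arr[j]+prev2, prev1); return prev1.
-- arr[i] is ported as pyGetD (exact under Pre_, which puts every accessed index in range).
def maxValTab (x : Int) (y : Int) (arr : List Int) : Int :=
  let prev2 : Int := PySem.List.pyGetD arr x 0
  let prev1 : Int := max (PySem.List.pyGetD arr x 0) (PySem.List.pyGetD arr (x + 1) 0)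
  ((PySem.List.pyRange (x + 2) (y + 1) 1).foldl
      (fun (p : Int × Int) j => (p.2, max (PySem.List.pyGetD arr j 0 + p.1) p.2))
      (prev2, prev1)).2

-- ===== PORT B =====
-- max-plus arithmetic over Option Int; none plays -infinity (Python's None)
def oadd : Option Int → Option Int → Option Int
  | some a, some b => some (a + b)
  | _, _ => none

def omax : Option Int → Option Int → Option Int
  | none, b => b
  | some a, none => some a
  | some a, some b => some (max a b)

-- one DP step (prev1, prev2) -> (max(prev1, arr[j]+prev2), prev1) as a max-plus 2x2 matrix
def matJ (arr : List Int) (j : Int) : Option Int × Option Int × Option Int × Option Int :=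
  (some 0, some (PySem.List.pyGetD arr j 0), some 0, none)

def composeM (m n : Option Int × Option Int × Option Int × Option Int) :
    Option Int × Option Int × Option Int × Option Int :=
  match m, n with
  | (ma, mb, mc, md), (na, nb, nc, nd) =>
    (omax (oadd ma na) (oadd mb nc), omax (oadd ma nb) (oadd mb nd),
     omax (oadd mc na) (oadd md nc), omax (oadd mc nb) (oadd md nd))

def applyM (m : Option Int × Option Int × Option Int × Option Int)
    (v : Option Int × Option Int) : Option Int × Option Int :=
  match m, v with
  | (a, b, c, d), (v1, v2) => (omax (oadd a v1) (oadd b v2), omax (oadd c v1) (oadd d v2))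

-- max-plus product of matJ over j in [lo, hi), hi > lo, by divide and conquer.
-- Structural recursion on a fuel = range length (a totality device only: with
-- fuel ≥ hi - lo > 0 the fuel-0 branch is never reached).
def prodF (arr : List Int) : Nat → Int → Int → Option Int × Option Int × Option Int × Option Int
  | 0, lo, _ => matJ arr lo
  | fuel + 1, lo, hi =>
    if hi ≤ lo + 1 then matJ arr lo
    else
      let mid := lo + PySem.Int.floordiv (hi - lo) 2
      composeM (prodF arr fuel mid hi) (prodF arr fuel lo mid)

def prodR (arr : List Int) (lo hi : Int) :
    Option Int × Option Int × Option Int × Option Int :=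
  prodF arr (hi - lo).toNat lo hi

-- Python B keeps the vector as plain ints; since its max-plus ops treat an int as a
-- present value, the port wraps the initial vector in `some` (exact correspondence).
def maxValTab_alt (x : Int) (y : Int) (arr : List Int) : Int :=
  let v : Option Int × Option Int :=
    (some (max (PySem.List.pyGetD arr x 0) (PySem.List.pyGetD arr (x + 1) 0)),
     some (PySem.List.pyGetD arr x 0))
  let goal := max y (x + 1)
  let v' := if goal ≥ x + 2 then applyM (prodR arr (x + 2) (goal + 1)) v else v
  v'.1.getD 0

-- ===== PRECONDITION & SPEC =====
-- Pre_ excludes exactly the inputs where Python A raises IndexError: arr[x] or arr[x+1]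
-- out of (negative-wrapping) range, or the loop reaching an index ≥ len(arr).
def Pre_maxValTab (x : Int) (y : Int) (arr : List Int) : Prop :=
  PySem.Raise.InRange arr.length x ∧ PySem.Raise.InRange arr.length (x + 1) ∧
    (y ≤ x + 1 ∨ y < (arr.length : Int))
instance (x : Int) (y : Int) (arr : List Int) : Decidable (Pre_maxValTab x y arr) := by
  unfold Pre_maxValTab; infer_instance

def pvWitness_maxValTab : Int × Int × List Int := (0, 2, [1, 2, 3])

def Spec_maxValTab (x : Int) (y : Int) (arr : List Int) (out : Int) : Prop := out = maxValTab_alt x y arr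
instance (x : Int) (y : Int) (arr : List Int) (out : Int) : Decidable (Spec_maxValTab x y arr out) := by unfold Spec_maxValTab; infer_instance

-- ===== CLAIM (what is proved, stated in full; the proofs are below) =====
def Claim_equal_maxValTab : Prop := ∀ (x : Int) (y : Int) (arr : List Int), Dom_maxValTab x y arr → Pre_maxValTab x y arr → Spec_maxValTab x y arr (maxValTab x y arr)

-- ===== LEMMAS AND PROOFS =====

theorem oadd_omax_left (a b c : Option Int) :
    oadd a (omax b c) = omax (oadd a b) (oadd a c) := by
  cases a <;> cases b <;> cases c <;> simp [oadd, omax] <;> omega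

theorem oadd_omax_right (a b c : Option Int) :
    oadd (omax a b) c = omax (oadd a c) (oadd b c) := by
  cases a <;> cases b <;> cases c <;> simp [oadd, omax] <;> omega

theorem oadd_assoc (a b c : Option Int) : oadd (oadd a b) c = oadd a (oadd b c) := by
  cases a <;> cases b <;> cases c <;> simp [oadd] <;> omega

theorem omax_comm (a b : Option Int) : omax a b = omax b a := by
  cases a <;> cases b <;> simp [omax] <;> omega

theorem omax_assoc (a b c : Option Int) : omax (omax a b) c = omax a (omax b c) := by
  cases a <;> cases b <;> cases c <;> simp [omax] <;> omega

theorem omax_left_comm (a b c : Option Int) : omax a (omax b c) = omax b (omax a c) := by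
  rw [← omax_assoc, omax_comm a b, omax_assoc]

theorem applyM_composeM (m n : Option Int × Option Int × Option Int × Option Int)
    (v : Option Int × Option Int) :
    applyM (composeM m n) v = applyM m (applyM n v) := by
  obtain ⟨ma, mb, mc, md⟩ := m
  obtain ⟨na, nb, nc, nd⟩ := n
  obtain ⟨v1, v2⟩ := v
  simp only [applyM, composeM, oadd_omax_right, oadd_omax_left, oadd_assoc]
  rw [Prod.mk.injEq]
  constructor <;>
    simp [omax_comm, omax_left_comm]

theorem prodF_apply (arr : List Int) :
    ∀ (fuel : Nat) (lo hi : Int), lo < hi → (hi - lo).toNat ≤ fuel →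
      ∀ v, applyM (prodF arr fuel lo hi) v =
        (PySem.List.pyRange lo hi 1).foldl (fun w j => applyM (matJ arr j) w) v := by
  intro fuel
  induction fuel with
  | zero => intro lo hi hlt hle; omega
  | succ fuel ih =>
    intro lo hi hlt hle v
    rw [prodF]
    by_cases h : hi ≤ lo + 1
    · have hhi : hi = lo + 1 := by omega
      subst hhi
      simp [PySem.List.pyRange_one_singleton, List.foldl]
    · simp only [if_neg h]
      have hfd : PySem.Int.floordiv (hi - lo) 2 = (hi - lo) / 2 := by
        simp only [PySem.Int.floordiv]
        rw [Int.fdiv_eq_ediv]; norm_num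
      set mid := lo + PySem.Int.floordiv (hi - lo) 2 with hmid
      have hm1 : lo < mid := by rw [hmid, hfd]; omega
      have hm2 : mid < hi := by rw [hmid, hfd]; omega
      rw [applyM_composeM,
        ih lo mid hm1 (by omega) v,
        ih mid hi hm2 (by omega) _,
        PySem.List.pyRange_one_append lo mid hi (by omega) (by omega),
        List.foldl_append]

theorem fold_corr (arr : List Int) :
    ∀ (l : List Int) (p2 p1 : Int),
      l.foldl (fun w j => applyM (matJ arr j) w) ((some p1 : Option Int), (some p2 : Option Int)) =
        (some ((l.foldl (fun (p : Int × Int) j =>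
            (p.2, max (PySem.List.pyGetD arr j 0 + p.1) p.2)) (p2, p1)).2),
         some ((l.foldl (fun (p : Int × Int) j =>
            (p.2, max (PySem.List.pyGetD arr j 0 + p.1) p.2)) (p2, p1)).1)) := by
  intro l
  induction l with
  | nil => intro p2 p1; rfl
  | cons j t ih =>
    intro p2 p1
    have hstep : applyM (matJ arr j) ((some p1 : Option Int), (some p2 : Option Int)) =
        ((some (max (PySem.List.pyGetD arr j 0 + p2) p1) : Option Int), (some p1 : Option Int)) := by
      simp [applyM, matJ, oadd, omax, max_comm]
    simp only [List.foldl_cons, hstep]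
    exact ih p1 (max (PySem.List.pyGetD arr j 0 + p2) p1)

-- ===== VERDICT (by name: the statement is the Claim_ definition above) =====
theorem maxValTab_spec : Claim_equal_maxValTab := by
  intro x y arr _hdom _hpre
  unfold Spec_maxValTab maxValTab maxValTab_alt
  by_cases hy : y ≤ x + 1
  · have hg : ¬ (max y (x + 1) ≥ x + 2) := by omega
    simp [PySem.List.pyRange_one_eq_nil (show y + 1 ≤ x + 2 by omega), hg]
  · have hg : max y (x + 1) = y := by omega
    simp only [hg, ge_iff_le, if_pos (by omega : x + 2 ≤ y)]
    unfold prodR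
    rw [prodF_apply arr (y + 1 - (x + 2)).toNat (x + 2) (y + 1) (by omega) (by omega),
      fold_corr]
    simp
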